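-- pv_equiv track=rewrite | github.com/anguspharris-lab/harris-farm-hub | dashboards/shared/paddock_questions.py | _score_u4
-- ===== SOURCE A (Python) =====
-- def _score_u4(answer):
--     if not answer:
--         return 0
--     correct = {"staff", "hours", "events", "budget", "history"}
--     score = 0
--     for a in answer:
--         if a in correct:
--             score += 20
--         if a == "fav_colour":
--             score -= 10
--     return max(0, min(score, 100))
-- ===== SOURCE B (Python) =====
-- def _score_u4(answer):
--     if not answer:
--         return 0
--     counts = {}
--     for a in answer:
--         counts[a] = counts.get(a, 0) + 1
--     score = 20 * sum(counts.get(k, 0) for k in ("staff", "hours", "events", "budget", "history")) \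
--             - 10 * counts.get("fav_colour", 0)
--     return max(0, min(score, 100))
-- ===== Notes on version B (the rewrite author's own statement) =====
-- stated objective: alternative
-- what changed: B builds a frequency table of the answer once and computes the score arithmetically from the five keyword counts and the fav_colour count, instead of A's per-element scan testing each element against the keyword set.
import Mathlib
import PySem

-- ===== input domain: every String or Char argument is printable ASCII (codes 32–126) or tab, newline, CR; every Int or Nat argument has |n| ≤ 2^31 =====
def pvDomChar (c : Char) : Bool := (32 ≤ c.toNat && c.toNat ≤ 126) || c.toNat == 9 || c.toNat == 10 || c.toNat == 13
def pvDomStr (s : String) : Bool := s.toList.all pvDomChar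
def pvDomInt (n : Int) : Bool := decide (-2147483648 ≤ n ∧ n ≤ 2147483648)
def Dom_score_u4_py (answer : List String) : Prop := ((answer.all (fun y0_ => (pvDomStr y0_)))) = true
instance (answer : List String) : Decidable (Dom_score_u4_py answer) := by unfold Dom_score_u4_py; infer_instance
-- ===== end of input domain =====

set_option maxRecDepth 8000

-- B replaces A's per-element scoring scan by a frequency table queried for the six relevant keys (alternative decomposition, same cost).

-- ===== PORT A =====
def score_u4_py (answer : List String) : Int :=
  if answer = [] then 0
  else
    let score := answer.foldl (fun score a =>
      let score := if a = "staff" ∨ a = "hours" ∨ a = "events" ∨ a = "budget" ∨ a = "history"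
        then score + 20 else score
      if a = "fav_colour" then score - 10 else score) 0
    max 0 (min score 100)

-- ===== PORT B =====
def score_u4_py_alt (answer : List String) : Int :=
  if answer = [] then 0
  else
    let counts : PySem.Dict String Int :=
      answer.foldl (fun d a => d.insert a (d.getD a 0 + 1)) PySem.Dict.empty
    let score := 20 * ((["staff", "hours", "events", "budget", "history"].map
        (fun k => counts.getD k 0)).sum)
      - 10 * counts.getD "fav_colour" 0
    max 0 (min score 100)

-- ===== PRECONDITION & SPEC =====
def Spec_score_u4_py (answer : List String) (out : Int) : Prop := out = score_u4_py_alt answer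
instance (answer : List String) (out : Int) : Decidable (Spec_score_u4_py answer out) := by unfold Spec_score_u4_py; infer_instance

-- ===== CLAIM (what is proved, stated in full; the proofs are below) =====
def Claim_equal_score_u4_py : Prop := ∀ (answer : List String), Dom_score_u4_py answer → Spec_score_u4_py answer (score_u4_py answer)

-- ===== LEMMAS AND PROOFS =====

-- the hand-built frequency table reads back as List.count
theorem pv_counts_getD (l : List String) (k : String) (d : PySem.Dict String Int) :
    (l.foldl (fun d a => d.insert a (d.getD a 0 + 1)) d).getD k 0
      = d.getD k 0 + (l.count k : Int) := by
  induction l generalizing d with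
  | nil => simp
  | cons x xs ih =>
    rw [List.foldl_cons, ih, PySem.Dict.getD_insert, List.count_cons]
    by_cases h : k = x
    · simp [h]; ring
    · simp [h, Ne.symm h]

-- A's fold equals the arithmetic form over counts
theorem pv_fold_eq (l : List String) (s : Int) :
    l.foldl (fun score a =>
      let score := if a = "staff" ∨ a = "hours" ∨ a = "events" ∨ a = "budget" ∨ a = "history"
        then score + 20 else score
      if a = "fav_colour" then score - 10 else score) s
    = s + 20 * ((l.count "staff" : Int) + l.count "hours" + l.count "events"
          + l.count "budget" + l.count "history")
      - 10 * (l.count "fav_colour" : Int) := by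
  induction l generalizing s with
  | nil => simp
  | cons x xs ih =>
    simp only [List.foldl_cons, ih, List.count_cons, beq_iff_eq]
    split_ifs <;> simp_all <;> ring

-- ===== VERDICT (by name: the statement is the Claim_ definition above) =====
theorem score_u4_py_spec : Claim_equal_score_u4_py := by
  intro answer _
  unfold Spec_score_u4_py score_u4_py score_u4_py_alt
  by_cases h : answer = []
  · simp [h]
  · simp only [h]
    rw [pv_fold_eq]
    simp [pv_counts_getD]
    ring_nf
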